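-- pv_equiv track=rewrite | github.com/slhowe/vent | PSvsNAVA/splitBreaths.py | split_breaths
-- ===== SOURCE A (Python) =====
-- def split_breaths(flow):
--     """
--     Splits the breaths where flow transitions from
--     expiration to inspiration.
--
--     Returns list of indices of split points
--     """
--
--     indices = []
--     pop_indices = []
--
--     # find all indices
--     for index in range(1,len(flow)):
--         if((flow[index] >= 0) and (flow[index-1] < 0)):
--             indices.append(index-1)
--
--     # remove any caused by noise around zero
--     MIN_DIFFERENCE = 200
--     for pos in range(len(indices)-1):
--         if (indices[pos+1] - indices[pos]) < MIN_DIFFERENCE: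
--             pop_indices.append(pos)
--     for pos in reversed(pop_indices):
--         indices.pop(pos)
--
--     return indices
-- ===== SOURCE B (Python) =====
-- def split_breaths(flow):
--     """
--     Splits the breaths where flow transitions from
--     expiration to inspiration.
--
--     Returns list of indices of split points
--     """
--     MIN_DIFFERENCE = 200
--     result = []
--     for index in range(1, len(flow)):
--         if flow[index] >= 0 and flow[index - 1] < 0:
--             t = index - 1
--             if result and t - result[-1] < MIN_DIFFERENCE:
--                 result[-1] = t
--             else:
--                 result.append(t)
--     return result
-- ===== Notes on version B (the rewrite author's own statement) =====
-- stated objective: simpler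
-- what changed: Single streaming pass that maintains the output online, replacing the last kept transition when the new one is closer than MIN_DIFFERENCE, instead of A's three phases (collect all transitions, mark close consecutive pairs, pop them in reverse).
import Mathlib
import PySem

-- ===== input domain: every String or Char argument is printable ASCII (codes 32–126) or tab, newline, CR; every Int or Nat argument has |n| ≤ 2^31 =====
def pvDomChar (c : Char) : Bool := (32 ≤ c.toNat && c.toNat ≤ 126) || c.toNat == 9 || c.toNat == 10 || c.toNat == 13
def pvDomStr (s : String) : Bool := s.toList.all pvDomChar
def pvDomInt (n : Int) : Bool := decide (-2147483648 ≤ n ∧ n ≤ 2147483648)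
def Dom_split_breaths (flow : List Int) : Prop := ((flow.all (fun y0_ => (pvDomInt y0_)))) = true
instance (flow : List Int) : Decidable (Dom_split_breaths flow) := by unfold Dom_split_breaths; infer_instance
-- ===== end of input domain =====

-- B replaces A's three phases (collect transitions, mark close consecutive pairs, pop in
-- reverse) by a single pass maintaining the output online (replace-or-append); objective: simpler.

-- ===== PORT A =====
def split_breaths (flow : List Int) : List Int :=
  -- find all indices
  let indices :=
    (PySem.List.pyRange 1 (flow.length : Int) 1).foldl
      (fun acc index =>
        if (PySem.List.pyGet? flow index).getD 0 ≥ 0 ∧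
           (PySem.List.pyGet? flow (index - 1)).getD 0 < 0 then
          acc ++ [index - 1]
        else acc) []
  -- remove any caused by noise around zero (MIN_DIFFERENCE = 200)
  let pop_indices :=
    (PySem.List.pyRange 0 ((indices.length : Int) - 1) 1).foldl
      (fun acc pos =>
        if (PySem.List.pyGet? indices (pos + 1)).getD 0 -
           (PySem.List.pyGet? indices pos).getD 0 < 200 then
          acc ++ [pos]
        else acc) []
  pop_indices.reverse.foldl
    (fun l pos =>
      match PySem.List.pop? l pos with
      | some (_, l') => l'
      | none => l) indices

-- ===== PORT B =====
def split_breaths_alt (flow : List Int) : List Int :=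
  (PySem.List.pyRange 1 (flow.length : Int) 1).foldl
    (fun result index =>
      if (PySem.List.pyGet? flow index).getD 0 ≥ 0 ∧
         (PySem.List.pyGet? flow (index - 1)).getD 0 < 0 then
        if result ≠ [] ∧ (index - 1) - (PySem.List.pyGet? result (-1)).getD 0 < 200 then
          result.dropLast ++ [index - 1]   -- result[-1] = t
        else
          result ++ [index - 1]            -- result.append(t)
      else result) []

-- ===== PRECONDITION & SPEC =====
def Spec_split_breaths (flow : List Int) (out : List Int) : Prop := out = split_breaths_alt flow
instance (flow : List Int) (out : List Int) : Decidable (Spec_split_breaths flow out) := by unfold Spec_split_breaths; infer_instance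

-- ===== CLAIM (what is proved, stated in full; the proofs are below) =====
def Claim_equal_split_breaths : Prop := ∀ (flow : List Int), Dom_split_breaths flow → Spec_split_breaths flow (split_breaths flow)

-- ===== LEMMAS AND PROOFS =====

-- the common reference function: keep a transition unless the next one is closer than 200
def keepFrom (p : Int) : List Int → List Int
  | [] => [p]
  | t :: ts => if t - p < 200 then keepFrom t ts else p :: keepFrom t ts

def keep : List Int → List Int
  | [] => []
  | t :: ts => keepFrom t ts

-- a collecting fold over any list is init ++ filter/map
theorem foldl_collect {α β : Type} (c : α → Prop) [DecidablePred c] (g : α → β)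
    (xs : List α) (init : List β) :
    xs.foldl (fun acc i => if c i then acc ++ [g i] else acc) init
      = init ++ (xs.filter (fun i => decide (c i))).map g := by
  induction xs generalizing init with
  | nil => simp
  | cons x xs ih =>
    simp only [List.foldl_cons, List.filter_cons]
    by_cases h : c x
    · simp [h, ih, List.append_assoc]
    · simp [h, ih]

-- the same when the collected value is the index itself
theorem foldl_collect_id {α : Type} (c : α → Prop) [DecidablePred c]
    (xs : List α) (init : List α) :
    xs.foldl (fun acc i => if c i then acc ++ [i] else acc) init
      = init ++ xs.filter (fun i => decide (c i)) := by
  have := foldl_collect c id xs init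
  simpa using this

-- a conditional fold over any list acts on the collected values
theorem foldl_cond_step {α β : Type} (c : α → Prop) [DecidablePred c] (g : α → β)
    (R : List β → β → List β) (xs : List α) (init : List β) :
    xs.foldl (fun acc i => if c i then R acc (g i) else acc) init
      = ((xs.filter (fun i => decide (c i))).map g).foldl R init := by
  induction xs generalizing init with
  | nil => simp
  | cons x xs ih =>
    simp only [List.foldl_cons, List.filter_cons]
    by_cases h : c x
    · simp [h, ih]
    · simp [h, ih]

-- filtering commutes with an index re-map (cast or successor)
theorem filter_comm_map {α β : Type} (f : α → β) (P : β → Bool) (Q : α → Bool)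
    (h : ∀ a, P (f a) = Q a) (l : List α) :
    (l.map f).filter P = (l.filter Q).map f := by
  induction l with
  | nil => simp
  | cons a l ih =>
    simp only [List.map_cons, List.filter_cons, h a]
    cases Q a <;> simp [ih]

-- filtering commutes with the successor re-map
theorem filter_comm_map_succ (P Q : Nat → Bool) (h : ∀ a, P (a + 1) = Q a) (l : List Nat) :
    (l.map Nat.succ).filter P = (l.filter Q).map (fun k => k + 1) := by
  induction l with
  | nil => simp
  | cons a l ih =>
    simp only [List.map_cons, List.filter_cons, Nat.succ_eq_add_one, h a]
    cases Q a <;> simp [ih]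

-- B's replace-or-append step
def roaStep (result : List Int) (t : Int) : List Int :=
  if result ≠ [] ∧ t - (PySem.List.pyGet? result (-1)).getD 0 < 200 then
    result.dropLast ++ [t]
  else
    result ++ [t]

theorem roaStep_append (acc : List Int) (p t : Int) :
    roaStep (acc ++ [p]) t =
      if t - p < 200 then acc ++ [t] else (acc ++ [p]) ++ [t] := by
  simp [roaStep, PySem.List.pyGet?_neg_one_append_singleton]

theorem foldl_roa_keepFrom (ts : List Int) : ∀ (acc : List Int) (p : Int),
    (ts.foldl roaStep (acc ++ [p])) = acc ++ keepFrom p ts := by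
  induction ts with
  | nil => simp [keepFrom]
  | cons t ts ih =>
    intro acc p
    simp only [List.foldl_cons, roaStep_append, keepFrom]
    by_cases h : t - p < 200
    · simp [h, ih]
    · rw [if_neg h, if_neg h, ih (acc ++ [p]) t, List.append_assoc]
      simp

theorem foldl_roa_keep (ts : List Int) : ts.foldl roaStep [] = keep ts := by
  cases ts with
  | nil => rfl
  | cons t ts =>
    have := foldl_roa_keepFrom ts [] t
    simpa [keep] using this

-- ---- A's pop machinery on an arbitrary transition list ----

-- A's phase 2, exactly as in the port
def popIdxs (ts : List Int) : List Int :=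
  (PySem.List.pyRange 0 ((ts.length : Int) - 1) 1).foldl
    (fun acc pos =>
      if (PySem.List.pyGet? ts (pos + 1)).getD 0 -
         (PySem.List.pyGet? ts pos).getD 0 < 200 then
        acc ++ [pos]
      else acc) []

-- A's phase 3 step, exactly as in the port
def popStep (l : List Int) (pos : Int) : List Int :=
  match PySem.List.pop? l pos with
  | some (_, l') => l'
  | none => l

def popAll (ts : List Int) : List Int := (popIdxs ts).reverse.foldl popStep ts

-- Nat-indexed versions
def gapIdxs (ts : List Int) : List Nat :=
  (List.range (ts.length - 1)).filter (fun k => decide (ts.getD (k+1) 0 - ts.getD k 0 < 200))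

def popAllN (ts : List Int) : List Int :=
  (gapIdxs ts).reverse.foldl (fun l k => l.eraseIdx k) ts

theorem popStep_natCast (l : List Int) (k : Nat) : popStep l (k : Int) = l.eraseIdx k := by
  by_cases h : k < l.length
  · simp [popStep, PySem.List.pop?_natCast l k h]
  · have h2 : ¬ ((k : Int) < (l.length : Int)) := by exact_mod_cast h
    have h1 : PySem.List.pop? l (k : Int) = none := by
      simp only [PySem.List.pop?, PySem.List.pyIdx?]
      rw [if_pos (by positivity : (0:Int) ≤ (k:Int)), if_neg h2]
      rfl
    rw [List.eraseIdx_of_length_le (by omega)]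
    simp [popStep, h1]

theorem popIdxs_eq_gapIdxs (ts : List Int) :
    popIdxs ts = (gapIdxs ts).map (fun (k : Nat) => (k : Int)) := by
  unfold popIdxs gapIdxs
  rw [foldl_collect_id (fun pos => (PySem.List.pyGet? ts (pos + 1)).getD 0 -
         (PySem.List.pyGet? ts pos).getD 0 < 200)]
  have hrange : PySem.List.pyRange 0 ((ts.length : Int) - 1) 1
      = (List.range (ts.length - 1)).map (fun (k : Nat) => (k : Int)) := by
    cases hl : ts.length with
    | zero =>
      rw [PySem.List.pyRange_one_eq_nil (by norm_num)]
      simp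
    | succ m =>
      have h1 : (((m + 1 : Nat) : Int) - 1) = ((m : Nat) : Int) := by push_cast; ring
      rw [h1, PySem.List.pyRange_zero_nat m]
      simp
  rw [hrange]
  simp only [List.nil_append]
  apply filter_comm_map
  intro k
  have h1 : (k : Int) + 1 = ((k + 1 : Nat) : Int) := by push_cast; ring
  rw [h1, PySem.List.pyGet?_natCast, PySem.List.pyGet?_natCast]
  simp [List.getD]

theorem foldl_eraseIdx_shift (ps : List Nat) (x : Int) (l : List Int) :
    (ps.map (· + 1)).foldl (fun l k => l.eraseIdx k) (x :: l)
      = x :: ps.foldl (fun l k => l.eraseIdx k) l := by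
  induction ps generalizing l with
  | nil => simp
  | cons p ps ih => simp [List.eraseIdx_cons_succ, ih]

theorem gapIdxs_cons (x y : Int) (ts : List Int) :
    gapIdxs (x :: y :: ts) =
      (if y - x < 200 then [0] else []) ++ (gapIdxs (y :: ts)).map (· + 1) := by
  unfold gapIdxs
  have hlen : (x :: y :: ts).length - 1 = ((y :: ts).length - 1) + 1 := by simp
  rw [hlen, List.range_succ_eq_map, List.filter_cons]
  have htail := filter_comm_map_succ
      (fun k => decide ((x :: y :: ts).getD (k + 1) 0 - (x :: y :: ts).getD k 0 < 200))
      (fun k => decide ((y :: ts).getD (k + 1) 0 - (y :: ts).getD k 0 < 200))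
      (fun k => by simp [List.getD]) (List.range ((y :: ts).length - 1))
  rw [htail]
  by_cases h : y - x < 200 <;> simp [List.getD, h]

theorem popAllN_cons (x y : Int) (ts : List Int) :
    popAllN (x :: y :: ts) =
      if y - x < 200 then popAllN (y :: ts) else x :: popAllN (y :: ts) := by
  unfold popAllN
  rw [gapIdxs_cons, List.reverse_append, List.foldl_append, ← List.map_reverse,
      foldl_eraseIdx_shift]
  by_cases h : y - x < 200 <;> simp [h]

theorem popAllN_eq_keep (ts : List Int) : popAllN ts = keep ts := by
  induction ts with
  | nil => rfl
  | cons x ts ih =>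
    cases ts with
    | nil => simp [popAllN, gapIdxs, keep, keepFrom]
    | cons y rest =>
      rw [popAllN_cons, ih]
      simp only [keep, keepFrom]

theorem popAll_eq_keep (ts : List Int) : popAll ts = keep ts := by
  rw [← popAllN_eq_keep]
  unfold popAll popAllN
  rw [popIdxs_eq_gapIdxs, ← List.map_reverse, List.foldl_map]
  simp only [popStep_natCast]

-- the whole pipeline, for any condition and extraction over any index list
theorem main_generic (c : Int → Prop) [DecidablePred c] (g : Int → Int) (xs : List Int) :
    popAll (xs.foldl (fun acc i => if c i then acc ++ [g i] else acc) [])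
      = xs.foldl (fun acc i => if c i then roaStep acc (g i) else acc) [] := by
  rw [foldl_collect c g, foldl_cond_step c g roaStep, foldl_roa_keep, List.nil_append]
  exact popAll_eq_keep _

theorem ports_eq (flow : List Int) : split_breaths flow = split_breaths_alt flow := by
  exact main_generic
    (fun index => (PySem.List.pyGet? flow index).getD 0 ≥ 0 ∧
                  (PySem.List.pyGet? flow (index - 1)).getD 0 < 0)
    (fun index => index - 1)
    (PySem.List.pyRange 1 (flow.length : Int) 1)

-- ===== VERDICT (by name: the statement is the Claim_ definition above) =====
theorem split_breaths_spec : Claim_equal_split_breaths := by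
  intro flow _
  unfold Spec_split_breaths
  exact ports_eq flow
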